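-- pv_equiv track=rewrite | github.com/banana-galaxy/challenges | challenge8(theater_escape)/Buczkek.py | whichExit
-- ===== SOURCE A (Python) =====
-- def whichExit(matrix):
--     for row in matrix:
--         if 0 in row:
--             pos = row.index(0)
--             left = 0
--             right = 0
--             for x in row[:pos]:
--                 if x == 1:
--                     left += 1
--             for x in row[pos+1:]:
--                 if x == 1:
--                     right += 1
--             break
--     if left == right:
--         return "same"
--     elif left > right:
--         return "right"
--     else:
--         return "left"
-- ===== SOURCE B (Python) =====
-- def whichExit(matrix):
--     for row in matrix:
--         if 0 in row:
--             left = 0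
--             right = 0
--             seen = False
--             for x in row:
--                 if x == 0 and not seen:
--                     seen = True
--                 elif x == 1:
--                     if seen:
--                         right += 1
--                     else:
--                         left += 1
--             break
--     if left == right:
--         return "same"
--     elif left > right:
--         return "right"
--     else:
--         return "left"
-- ===== Notes on version B (the rewrite author's own statement) =====
-- stated objective: simpler
-- what changed: Replaces index()+two slice loops with a single pass over the row using a latched seen-zero flag that routes 1s to left or right.
import Mathlib
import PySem

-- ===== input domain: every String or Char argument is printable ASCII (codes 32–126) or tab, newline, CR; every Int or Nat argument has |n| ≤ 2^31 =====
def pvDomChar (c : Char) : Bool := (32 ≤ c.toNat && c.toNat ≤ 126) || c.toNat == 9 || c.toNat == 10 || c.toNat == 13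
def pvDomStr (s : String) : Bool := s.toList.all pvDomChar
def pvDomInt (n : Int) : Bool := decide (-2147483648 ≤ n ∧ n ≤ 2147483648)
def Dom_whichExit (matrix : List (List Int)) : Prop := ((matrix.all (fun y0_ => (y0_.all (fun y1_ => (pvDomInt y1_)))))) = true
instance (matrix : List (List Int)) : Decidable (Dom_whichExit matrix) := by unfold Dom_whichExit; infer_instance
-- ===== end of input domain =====

-- B replaces A's index()+two slice loops with one pass over the row using a latched
-- seen-zero flag (objective: simpler). Where no row contains a 0, Python A raises
-- UnboundLocalError; Pre_ excludes those inputs.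

-- ===== PORT A =====
-- the for-loop over matrix: returns the (left, right) counts of the first row containing 0
def whichExitA_find : List (List Int) → Option (Int × Int)
  | [] => none
  | row :: rest =>
    if (0 : Int) ∈ row then
      let pos : Nat := (PySem.List.index? row 0).getD 0
      let left : Int := (PySem.List.slice row none (some (pos : Int))).foldl
        (fun l x => if x = 1 then l + 1 else l) 0
      let right : Int := (PySem.List.slice row (some ((pos : Int) + 1)) none).foldl
        (fun r x => if x = 1 then r + 1 else r) 0
      some (left, right)
    else whichExitA_find rest

def whichExit (matrix : List (List Int)) : String :=
  match whichExitA_find matrix with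
  | none => ""   -- Python raises UnboundLocalError here; excluded by Pre_whichExit
  | some (l, r) => if l = r then "same" else if l > r then "right" else "left"

-- ===== PORT B =====
-- single pass over the row: latch the flag at the first 0, route 1s to left/right
def whichExitB_step (st : Bool × Int × Int) (x : Int) : Bool × Int × Int :=
  if x = 0 ∧ st.1 = false then (true, st.2.1, st.2.2)
  else if x = 1 then
    (if st.1 then (st.1, st.2.1, st.2.2 + 1) else (st.1, st.2.1 + 1, st.2.2))
  else st

def whichExitB_find : List (List Int) → Option (Int × Int)
  | [] => none
  | row :: rest =>
    if (0 : Int) ∈ row then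
      let s := row.foldl whichExitB_step (false, 0, 0)
      some (s.2.1, s.2.2)
    else whichExitB_find rest

def whichExit_alt (matrix : List (List Int)) : String :=
  match whichExitB_find matrix with
  | none => ""   -- Python raises UnboundLocalError here; excluded by Pre_whichExit
  | some (l, r) => if l = r then "same" else if l > r then "right" else "left"

-- ===== PRECONDITION & SPEC =====
-- Pre_ excludes exactly the inputs where no row contains a 0: there Python A raises UnboundLocalError.
def Pre_whichExit (matrix : List (List Int)) : Prop := ∃ row ∈ matrix, (0 : Int) ∈ row
instance (matrix : List (List Int)) : Decidable (Pre_whichExit matrix) := by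
  unfold Pre_whichExit; infer_instance
def pvWitness_whichExit : List (List Int) := [[2, 1], [1, 0, 1, 1]]

def Spec_whichExit (matrix : List (List Int)) (out : String) : Prop := out = whichExit_alt matrix
instance (matrix : List (List Int)) (out : String) : Decidable (Spec_whichExit matrix out) := by
  unfold Spec_whichExit; infer_instance

-- ===== CLAIM (what is proved, stated in full; the proofs are below) =====
def Claim_equal_whichExit : Prop := ∀ (matrix : List (List Int)), Dom_whichExit matrix → Pre_whichExit matrix → Spec_whichExit matrix (whichExit matrix)

-- ===== LEMMAS AND PROOFS =====

theorem whichExitB_foldl_pre (a : List Int) (h : (0 : Int) ∉ a) (l r : Int) :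
    a.foldl whichExitB_step (false, l, r)
      = (false, a.foldl (fun l x => if x = 1 then l + 1 else l) l, r) := by
  induction a generalizing l with
  | nil => rfl
  | cons x a ih =>
    have hx : x ≠ 0 := fun hx => h (by simp [hx])
    have ha : (0 : Int) ∉ a := fun hm => h (List.mem_cons_of_mem _ hm)
    simp only [List.foldl_cons, whichExitB_step, hx, false_and, if_false]
    by_cases h1 : x = 1 <;> simp [h1, ih ha]

theorem whichExitB_foldl_post (b : List Int) (l r : Int) :
    b.foldl whichExitB_step (true, l, r)
      = (true, l, b.foldl (fun r x => if x = 1 then r + 1 else r) r) := by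
  induction b generalizing r with
  | nil => rfl
  | cons x b ih =>
    simp only [List.foldl_cons, whichExitB_step]
    by_cases h1 : x = 1 <;> simp [h1, ih]

theorem whichExit_find_eq (matrix : List (List Int)) :
    whichExitA_find matrix = whichExitB_find matrix := by
  induction matrix with
  | nil => rfl
  | cons row rest ih =>
    by_cases hz : (0 : Int) ∈ row
    · rw [whichExitA_find, whichExitB_find, if_pos hz, if_pos hz]
      obtain ⟨k, hk⟩ := (PySem.List.index?_isSome_iff (xs := row) (v := 0)).2 hz
        |> Option.isSome_iff_exists.mp
      obtain ⟨a, b, hrow, hlen, hna⟩ := (PySem.List.index?_eq_some_iff _ _ _).1 hk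
      have hpos : (PySem.List.index? row 0).getD 0 = k := by rw [hk]; rfl
      have htake : PySem.List.slice row none (some ((k : Nat) : Int)) = a := by
        rw [PySem.List.slice_to_natCast, hrow, ← hlen, List.take_left]
      have hdrop : PySem.List.slice row (some (((k : Nat) : Int) + 1)) none = b := by
        have : ((k : Nat) : Int) + 1 = ((k + 1 : Nat) : Int) := by push_cast; ring
        rw [this, PySem.List.slice_from_natCast, hrow, ← hlen]
        simp
      have hscan : row.foldl whichExitB_step (false, 0, 0)
          = (true, a.foldl (fun l x => if x = 1 then l + 1 else l) 0,
                   b.foldl (fun r x => if x = 1 then r + 1 else r) 0) := by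
        rw [hrow, List.foldl_append, whichExitB_foldl_pre a hna, List.foldl_cons]
        have : whichExitB_step (false, a.foldl (fun l x => if x = 1 then l + 1 else l) 0, 0) 0
            = (true, a.foldl (fun l x => if x = 1 then l + 1 else l) 0, 0) := by
          simp [whichExitB_step]
        rw [this, whichExitB_foldl_post]
      simp only [hpos, htake, hdrop, hscan]
    · rw [whichExitA_find, whichExitB_find, if_neg hz, if_neg hz, ih]

-- ===== VERDICT (by name: the statement is the Claim_ definition above) =====
theorem whichExit_spec : Claim_equal_whichExit := by
  intro matrix _ _
  unfold Spec_whichExit whichExit whichExit_alt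
  rw [whichExit_find_eq]
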